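-- pv_equiv track=rewrite | github.com/boddusaiganesh/openev | rewards.py | _clause_type_family_match
-- ===== SOURCE A (Python) =====
-- from typing import Optional, Tuple, List
--
-- def _clause_type_family_match(agent_type: Optional[str], truth_type: str) -> bool:
--     if agent_type is None:
--         return False
--     families = {
--         "liability":   {"indemnification", "limitation_of_liability", "warranty", "insurance"},
--         "restrictive": {"non_compete", "confidentiality", "intellectual_property"},
--         "governance":  {"governing_law", "dispute_resolution", "assignment"},
--         "commercial":  {"payment_terms", "representations", "termination"},
--         "external":    {"force_majeure", "data_protection"},
--     }
--     for members in families.values():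
--         if agent_type in members and truth_type in members:
--             return True
--     return False
-- ===== SOURCE B (Python) =====
-- from typing import Optional
--
-- # One entry per clause type: clause type -> family name (families are disjoint).
-- _FAMILY_OF = {
--     "indemnification": "liability", "limitation_of_liability": "liability",
--     "warranty": "liability", "insurance": "liability",
--     "non_compete": "restrictive", "confidentiality": "restrictive",
--     "intellectual_property": "restrictive",
--     "governing_law": "governance", "dispute_resolution": "governance",
--     "assignment": "governance",
--     "payment_terms": "commercial", "representations": "commercial",
--     "termination": "commercial",
--     "force_majeure": "external", "data_protection": "external",
-- }
--
-- def _clause_type_family_match(agent_type: Optional[str], truth_type: str) -> bool: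
--     if agent_type is None:
--         return False
--     fam = _FAMILY_OF.get(agent_type)
--     return fam is not None and _FAMILY_OF.get(truth_type) == fam
-- ===== Notes on version B (the rewrite author's own statement) =====
-- stated objective: simpler
-- what changed: Replaced the loop over family member-sets with an inverted clause-type-to-family map and two direct lookups (no iteration remains).
import Mathlib
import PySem

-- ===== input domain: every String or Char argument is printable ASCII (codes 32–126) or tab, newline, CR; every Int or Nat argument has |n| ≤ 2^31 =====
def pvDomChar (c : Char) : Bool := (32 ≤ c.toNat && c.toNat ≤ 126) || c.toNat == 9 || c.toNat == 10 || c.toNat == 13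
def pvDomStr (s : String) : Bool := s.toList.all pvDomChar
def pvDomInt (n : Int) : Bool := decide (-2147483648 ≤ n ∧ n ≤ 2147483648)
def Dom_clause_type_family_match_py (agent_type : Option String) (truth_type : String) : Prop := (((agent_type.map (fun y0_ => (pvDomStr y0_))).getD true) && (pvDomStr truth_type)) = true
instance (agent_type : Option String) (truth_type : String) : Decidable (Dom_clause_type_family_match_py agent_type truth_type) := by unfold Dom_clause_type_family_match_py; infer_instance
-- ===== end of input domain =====

-- B replaces the loop over family member-sets with an inverted clause-type→family map and two lookups (simpler).


-- ===== PORT A =====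
def clause_type_family_match_py (agent_type : Option String) (truth_type : String) : Bool :=
  match agent_type with
  | none => false
  | some a =>
    let families : List (PySem.Set String) :=
      [ PySem.Set.ofList ["indemnification", "limitation_of_liability", "warranty", "insurance"],
        PySem.Set.ofList ["non_compete", "confidentiality", "intellectual_property"],
        PySem.Set.ofList ["governing_law", "dispute_resolution", "assignment"],
        PySem.Set.ofList ["payment_terms", "representations", "termination"],
        PySem.Set.ofList ["force_majeure", "data_protection"] ]
    -- 'for … return True / return False' = any over the families, in order
    families.any (fun members => members.contains a && members.contains truth_type)

-- ===== PORT B =====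
def familyOf : PySem.Dict String String :=
  PySem.Dict.ofList
    [ ("indemnification", "liability"), ("limitation_of_liability", "liability"),
      ("warranty", "liability"), ("insurance", "liability"),
      ("non_compete", "restrictive"), ("confidentiality", "restrictive"),
      ("intellectual_property", "restrictive"),
      ("governing_law", "governance"), ("dispute_resolution", "governance"),
      ("assignment", "governance"),
      ("payment_terms", "commercial"), ("representations", "commercial"),
      ("termination", "commercial"),
      ("force_majeure", "external"), ("data_protection", "external") ]

def clause_type_family_match_py_alt (agent_type : Option String) (truth_type : String) : Bool :=
  match agent_type with
  | none => false
  | some a =>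
    match familyOf.get? a with
    | none => false
    | some fam => familyOf.get? truth_type == some fam

-- ===== PRECONDITION & SPEC =====
def Spec_clause_type_family_match_py (agent_type : Option String) (truth_type : String) (out : Bool) : Prop := out = clause_type_family_match_py_alt agent_type truth_type
instance (agent_type : Option String) (truth_type : String) (out : Bool) : Decidable (Spec_clause_type_family_match_py agent_type truth_type out) := by unfold Spec_clause_type_family_match_py; infer_instance

-- ===== CLAIM (what is proved, stated in full; the proofs are below) =====
def Claim_equal_clause_type_family_match_py : Prop := ∀ (agent_type : Option String) (truth_type : String), Dom_clause_type_family_match_py agent_type truth_type → Spec_clause_type_family_match_py agent_type truth_type (clause_type_family_match_py agent_type truth_type)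

-- ===== LEMMAS AND PROOFS =====

-- ===== VERDICT (by name: the statement is the Claim_ definition above) =====
lemma get_none_of_notin (x : String)
    (h : x ∉ ["indemnification", "limitation_of_liability", "warranty", "insurance",
      "non_compete", "confidentiality", "intellectual_property", "governing_law",
      "dispute_resolution", "assignment", "payment_terms", "representations",
      "termination", "force_majeure", "data_protection"]) :
    familyOf.get? x = none := by
  have hk : familyOf.keys = ["indemnification", "limitation_of_liability", "warranty", "insurance",
      "non_compete", "confidentiality", "intellectual_property", "governing_law",
      "dispute_resolution", "assignment", "payment_terms", "representations",
      "termination", "force_majeure", "data_protection"] := by decide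
  rw [PySem.Dict.get?_eq_none_iff_not_mem_keys, hk]
  exact h

lemma cont_liability (x : String) :
    (PySem.Set.contains ["indemnification", "limitation_of_liability", "warranty", "insurance"] x)
      = (familyOf.get? x == some "liability") := by
  rcases eq_or_ne x "indemnification" with rfl | h1
  · decide
  rcases eq_or_ne x "limitation_of_liability" with rfl | h2
  · decide
  rcases eq_or_ne x "warranty" with rfl | h3
  · decide
  rcases eq_or_ne x "insurance" with rfl | h4
  · decide
  rcases eq_or_ne x "non_compete" with rfl | h5
  · decide
  rcases eq_or_ne x "confidentiality" with rfl | h6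
  · decide
  rcases eq_or_ne x "intellectual_property" with rfl | h7
  · decide
  rcases eq_or_ne x "governing_law" with rfl | h8
  · decide
  rcases eq_or_ne x "dispute_resolution" with rfl | h9
  · decide
  rcases eq_or_ne x "assignment" with rfl | h10
  · decide
  rcases eq_or_ne x "payment_terms" with rfl | h11
  · decide
  rcases eq_or_ne x "representations" with rfl | h12
  · decide
  rcases eq_or_ne x "termination" with rfl | h13
  · decide
  rcases eq_or_ne x "force_majeure" with rfl | h14
  · decide
  rcases eq_or_ne x "data_protection" with rfl | h15
  · decide
  rw [get_none_of_notin x (by simp [h1, h2, h3, h4, h5, h6, h7, h8, h9, h10, h11, h12, h13, h14, h15])]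
  have hn : ((none : Option String) == some "liability") = false := rfl
  rw [hn]
  simp only [PySem.Set.contains_eq_listContains, List.contains_cons, List.contains_nil,
    Bool.or_false, Bool.or_eq_false_iff, beq_eq_false_iff_ne, ne_eq]
  exact ⟨h1, h2, h3, h4⟩

lemma cont_restrictive (x : String) :
    (PySem.Set.contains ["non_compete", "confidentiality", "intellectual_property"] x)
      = (familyOf.get? x == some "restrictive") := by
  rcases eq_or_ne x "indemnification" with rfl | h1
  · decide
  rcases eq_or_ne x "limitation_of_liability" with rfl | h2
  · decide
  rcases eq_or_ne x "warranty" with rfl | h3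
  · decide
  rcases eq_or_ne x "insurance" with rfl | h4
  · decide
  rcases eq_or_ne x "non_compete" with rfl | h5
  · decide
  rcases eq_or_ne x "confidentiality" with rfl | h6
  · decide
  rcases eq_or_ne x "intellectual_property" with rfl | h7
  · decide
  rcases eq_or_ne x "governing_law" with rfl | h8
  · decide
  rcases eq_or_ne x "dispute_resolution" with rfl | h9
  · decide
  rcases eq_or_ne x "assignment" with rfl | h10
  · decide
  rcases eq_or_ne x "payment_terms" with rfl | h11
  · decide
  rcases eq_or_ne x "representations" with rfl | h12
  · decide
  rcases eq_or_ne x "termination" with rfl | h13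
  · decide
  rcases eq_or_ne x "force_majeure" with rfl | h14
  · decide
  rcases eq_or_ne x "data_protection" with rfl | h15
  · decide
  rw [get_none_of_notin x (by simp [h1, h2, h3, h4, h5, h6, h7, h8, h9, h10, h11, h12, h13, h14, h15])]
  have hn : ((none : Option String) == some "restrictive") = false := rfl
  rw [hn]
  simp only [PySem.Set.contains_eq_listContains, List.contains_cons, List.contains_nil,
    Bool.or_false, Bool.or_eq_false_iff, beq_eq_false_iff_ne, ne_eq]
  exact ⟨h5, h6, h7⟩

lemma cont_governance (x : String) :
    (PySem.Set.contains ["governing_law", "dispute_resolution", "assignment"] x)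
      = (familyOf.get? x == some "governance") := by
  rcases eq_or_ne x "indemnification" with rfl | h1
  · decide
  rcases eq_or_ne x "limitation_of_liability" with rfl | h2
  · decide
  rcases eq_or_ne x "warranty" with rfl | h3
  · decide
  rcases eq_or_ne x "insurance" with rfl | h4
  · decide
  rcases eq_or_ne x "non_compete" with rfl | h5
  · decide
  rcases eq_or_ne x "confidentiality" with rfl | h6
  · decide
  rcases eq_or_ne x "intellectual_property" with rfl | h7
  · decide
  rcases eq_or_ne x "governing_law" with rfl | h8
  · decide
  rcases eq_or_ne x "dispute_resolution" with rfl | h9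
  · decide
  rcases eq_or_ne x "assignment" with rfl | h10
  · decide
  rcases eq_or_ne x "payment_terms" with rfl | h11
  · decide
  rcases eq_or_ne x "representations" with rfl | h12
  · decide
  rcases eq_or_ne x "termination" with rfl | h13
  · decide
  rcases eq_or_ne x "force_majeure" with rfl | h14
  · decide
  rcases eq_or_ne x "data_protection" with rfl | h15
  · decide
  rw [get_none_of_notin x (by simp [h1, h2, h3, h4, h5, h6, h7, h8, h9, h10, h11, h12, h13, h14, h15])]
  have hn : ((none : Option String) == some "governance") = false := rfl
  rw [hn]
  simp only [PySem.Set.contains_eq_listContains, List.contains_cons, List.contains_nil,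
    Bool.or_false, Bool.or_eq_false_iff, beq_eq_false_iff_ne, ne_eq]
  exact ⟨h8, h9, h10⟩

lemma cont_commercial (x : String) :
    (PySem.Set.contains ["payment_terms", "representations", "termination"] x)
      = (familyOf.get? x == some "commercial") := by
  rcases eq_or_ne x "indemnification" with rfl | h1
  · decide
  rcases eq_or_ne x "limitation_of_liability" with rfl | h2
  · decide
  rcases eq_or_ne x "warranty" with rfl | h3
  · decide
  rcases eq_or_ne x "insurance" with rfl | h4
  · decide
  rcases eq_or_ne x "non_compete" with rfl | h5
  · decide
  rcases eq_or_ne x "confidentiality" with rfl | h6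
  · decide
  rcases eq_or_ne x "intellectual_property" with rfl | h7
  · decide
  rcases eq_or_ne x "governing_law" with rfl | h8
  · decide
  rcases eq_or_ne x "dispute_resolution" with rfl | h9
  · decide
  rcases eq_or_ne x "assignment" with rfl | h10
  · decide
  rcases eq_or_ne x "payment_terms" with rfl | h11
  · decide
  rcases eq_or_ne x "representations" with rfl | h12
  · decide
  rcases eq_or_ne x "termination" with rfl | h13
  · decide
  rcases eq_or_ne x "force_majeure" with rfl | h14
  · decide
  rcases eq_or_ne x "data_protection" with rfl | h15
  · decide
  rw [get_none_of_notin x (by simp [h1, h2, h3, h4, h5, h6, h7, h8, h9, h10, h11, h12, h13, h14, h15])]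
  have hn : ((none : Option String) == some "commercial") = false := rfl
  rw [hn]
  simp only [PySem.Set.contains_eq_listContains, List.contains_cons, List.contains_nil,
    Bool.or_false, Bool.or_eq_false_iff, beq_eq_false_iff_ne, ne_eq]
  exact ⟨h11, h12, h13⟩

lemma cont_external (x : String) :
    (PySem.Set.contains ["force_majeure", "data_protection"] x)
      = (familyOf.get? x == some "external") := by
  rcases eq_or_ne x "indemnification" with rfl | h1
  · decide
  rcases eq_or_ne x "limitation_of_liability" with rfl | h2
  · decide
  rcases eq_or_ne x "warranty" with rfl | h3
  · decide
  rcases eq_or_ne x "insurance" with rfl | h4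
  · decide
  rcases eq_or_ne x "non_compete" with rfl | h5
  · decide
  rcases eq_or_ne x "confidentiality" with rfl | h6
  · decide
  rcases eq_or_ne x "intellectual_property" with rfl | h7
  · decide
  rcases eq_or_ne x "governing_law" with rfl | h8
  · decide
  rcases eq_or_ne x "dispute_resolution" with rfl | h9
  · decide
  rcases eq_or_ne x "assignment" with rfl | h10
  · decide
  rcases eq_or_ne x "payment_terms" with rfl | h11
  · decide
  rcases eq_or_ne x "representations" with rfl | h12
  · decide
  rcases eq_or_ne x "termination" with rfl | h13
  · decide
  rcases eq_or_ne x "force_majeure" with rfl | h14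
  · decide
  rcases eq_or_ne x "data_protection" with rfl | h15
  · decide
  rw [get_none_of_notin x (by simp [h1, h2, h3, h4, h5, h6, h7, h8, h9, h10, h11, h12, h13, h14, h15])]
  have hn : ((none : Option String) == some "external") = false := rfl
  rw [hn]
  simp only [PySem.Set.contains_eq_listContains, List.contains_cons, List.contains_nil,
    Bool.or_false, Bool.or_eq_false_iff, beq_eq_false_iff_ne, ne_eq]
  exact ⟨h14, h15⟩

lemma get_range (x : String) :
    familyOf.get? x = none ∨ familyOf.get? x = some "liability" ∨
    familyOf.get? x = some "restrictive" ∨ familyOf.get? x = some "governance" ∨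
    familyOf.get? x = some "commercial" ∨ familyOf.get? x = some "external" := by
  rcases eq_or_ne x "indemnification" with rfl | h1
  · decide
  rcases eq_or_ne x "limitation_of_liability" with rfl | h2
  · decide
  rcases eq_or_ne x "warranty" with rfl | h3
  · decide
  rcases eq_or_ne x "insurance" with rfl | h4
  · decide
  rcases eq_or_ne x "non_compete" with rfl | h5
  · decide
  rcases eq_or_ne x "confidentiality" with rfl | h6
  · decide
  rcases eq_or_ne x "intellectual_property" with rfl | h7
  · decide
  rcases eq_or_ne x "governing_law" with rfl | h8
  · decide
  rcases eq_or_ne x "dispute_resolution" with rfl | h9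
  · decide
  rcases eq_or_ne x "assignment" with rfl | h10
  · decide
  rcases eq_or_ne x "payment_terms" with rfl | h11
  · decide
  rcases eq_or_ne x "representations" with rfl | h12
  · decide
  rcases eq_or_ne x "termination" with rfl | h13
  · decide
  rcases eq_or_ne x "force_majeure" with rfl | h14
  · decide
  rcases eq_or_ne x "data_protection" with rfl | h15
  · decide
  exact Or.inl (get_none_of_notin x (by simp [h1, h2, h3, h4, h5, h6, h7, h8, h9, h10, h11, h12, h13, h14, h15]))

theorem clause_type_family_match_py_spec : Claim_equal_clause_type_family_match_py := by
  intro agent_type truth_type _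
  unfold Spec_clause_type_family_match_py
  cases agent_type with
  | none => rfl
  | some a =>
    simp only [clause_type_family_match_py, clause_type_family_match_py_alt]
    have e1 : PySem.Set.ofList ["indemnification", "limitation_of_liability", "warranty", "insurance"]
        = ["indemnification", "limitation_of_liability", "warranty", "insurance"] := by decide
    have e2 : PySem.Set.ofList ["non_compete", "confidentiality", "intellectual_property"]
        = ["non_compete", "confidentiality", "intellectual_property"] := by decide
    have e3 : PySem.Set.ofList ["governing_law", "dispute_resolution", "assignment"]
        = ["governing_law", "dispute_resolution", "assignment"] := by decide
    have e4 : PySem.Set.ofList ["payment_terms", "representations", "termination"]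
        = ["payment_terms", "representations", "termination"] := by decide
    have e5 : PySem.Set.ofList ["force_majeure", "data_protection"]
        = ["force_majeure", "data_protection"] := by decide
    simp only [e1, e2, e3, e4, e5, List.any_cons, List.any_nil, Bool.or_false,
      cont_liability, cont_restrictive, cont_governance, cont_commercial, cont_external]
    rcases get_range a with ha | ha | ha | ha | ha | ha <;>
      rcases get_range truth_type with ht | ht | ht | ht | ht | ht <;>
      rw [ha, ht] <;> decide
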